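-- pv_equiv track=rewrite | github.com/ankurbhambri/DS-Algo | graph/Graph Algorithms/single_source_shortest_path.py | using_DFS
-- ===== SOURCE A (Python) =====
-- def using_DFS(n, graph):
--
--     # distance list to get distance from parent node
--     dis = {i: 0 for i in range(1, n + 1)}
--
--     # adjacency list
--     adj = {i: [] for i in range(1, n + 1)}
--
--     for u, v in graph:
--         adj[u].append(v)
--         adj[v].append(u)
--
--     visit = set()
--
--     def dfs(node):
--         visit.add(node)
--         for ch in adj[node]:
--             if ch not in visit:
--                 dis[ch] = 1 + dis[node]
--                 dfs(ch)
--
--     dfs(1) # start node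
--     return dis
--
-- graph = [[1, 2], [2, 4], [2, 5], [2, 6], [1, 3], [3, 7], [1, 8]]
--
-- n = 8
-- ===== SOURCE B (Python) =====
-- def using_DFS(n, graph):
--     # Iterative DFS with an explicit frame stack (node, iterator over its adjacency),
--     # simulating the recursion exactly, so discovery order and distances are identical.
--     dis = {i: 0 for i in range(1, n + 1)}
--
--     adj = {i: [] for i in range(1, n + 1)}
--     for u, v in graph:
--         adj[u].append(v)
--         adj[v].append(u)
--
--     visit = {1}
--     stack = [(1, iter(adj[1]))]
--     while stack:
--         node, it = stack[-1]
--         advanced = False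
--         for ch in it:
--             if ch not in visit:
--                 dis[ch] = 1 + dis[node]
--                 visit.add(ch)
--                 stack.append((ch, iter(adj[ch])))
--                 advanced = True
--                 break
--         if not advanced:
--             stack.pop()
--     return dis
-- ===== Notes on version B (the rewrite author's own statement) =====
-- stated objective: alternative
-- what changed: The recursive dfs is replaced by an explicit stack of (node, per-frame child iterator) frames that simulates the recursion iteratively, preserving the exact DFS discovery order and distances without Python recursion.
import Mathlib
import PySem

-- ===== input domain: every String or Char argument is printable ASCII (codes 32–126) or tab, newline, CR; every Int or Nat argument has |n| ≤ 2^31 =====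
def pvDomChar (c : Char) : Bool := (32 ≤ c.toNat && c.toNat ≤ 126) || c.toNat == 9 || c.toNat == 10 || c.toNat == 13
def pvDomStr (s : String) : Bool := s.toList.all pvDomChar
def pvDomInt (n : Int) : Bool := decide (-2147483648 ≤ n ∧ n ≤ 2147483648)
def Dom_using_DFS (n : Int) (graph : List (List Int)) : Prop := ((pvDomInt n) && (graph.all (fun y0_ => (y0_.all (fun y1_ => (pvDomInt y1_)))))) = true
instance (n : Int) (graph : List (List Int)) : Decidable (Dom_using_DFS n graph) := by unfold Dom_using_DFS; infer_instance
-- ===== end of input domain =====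

-- B replaces A's recursive dfs by an explicit stack of (node, remaining-children) frames that
-- simulates the recursion exactly (same discovery order, same distances); A mutates nothing observable.
-- Both ports thread a fuel counter (one unit per node entry) purely as a termination device; under
-- Pre_ the fuel n+1 is never exhausted.

-- shared helpers: both Pythons build dis and adj with the same two comprehensions and edge loop
def pvDis0 (n : Int) : PySem.Dict Int Int :=
  (PySem.List.pyRange 1 (n + 1) 1).foldl (fun d i => d.insert i 0) PySem.Dict.empty

def pvAdj (n : Int) (graph : List (List Int)) : PySem.Dict Int (List Int) :=
  graph.foldl
    (fun a e =>
      match e with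
      | [u, v] => (a.modify u [] (· ++ [v])).modify v [] (· ++ [u])
      | _ => a)  -- Python raises on a non-pair edge; excluded by Pre_
    ((PySem.List.pyRange 1 (n + 1) 1).foldl (fun d i => d.insert i ([] : List Int)) PySem.Dict.empty)

-- ===== PORT A =====
-- A's recursive dfs; the returned {f // f ≤ fuel} is the remaining fuel (termination bookkeeping only)
mutual
def dfsA (adj : PySem.Dict Int (List Int)) (fuel : Nat) (node : Int) (dis : PySem.Dict Int Int)
    (visit : PySem.Set Int) : (PySem.Dict Int Int × PySem.Set Int) × {f : Nat // f ≤ fuel} :=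
  match fuel with
  | 0 => ((dis, visit), ⟨0, Nat.le_refl 0⟩)
  | f + 1 =>
    let r := dfsAC adj f node (adj.getD node []) dis (visit.add node)
    (r.1, ⟨r.2.1, Nat.le_succ_of_le r.2.2⟩)
termination_by (fuel, 0)
decreasing_by exact Prod.Lex.left _ _ (Nat.lt_succ_self _)

def dfsAC (adj : PySem.Dict Int (List Int)) (fuel : Nat) (node : Int) (chs : List Int)
    (dis : PySem.Dict Int Int) (visit : PySem.Set Int) :
    (PySem.Dict Int Int × PySem.Set Int) × {f : Nat // f ≤ fuel} :=
  match chs with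
  | [] => ((dis, visit), ⟨fuel, Nat.le_refl fuel⟩)
  | ch :: rest =>
    if PySem.Set.contains visit ch then
      dfsAC adj fuel node rest dis visit
    else
      let r := dfsA adj fuel ch (dis.insert ch (1 + dis.getD node 0)) visit
      let s := dfsAC adj r.2.1 node rest r.1.1 r.1.2
      (s.1, ⟨s.2.1, Nat.le_trans s.2.2 r.2.2⟩)
termination_by (fuel, chs.length + 1)
decreasing_by
  · exact Prod.Lex.right _ (by simp)
  · exact Prod.Lex.right _ (by simp)
  · rcases Nat.lt_or_ge r.2.1 fuel with h | h
    · exact Prod.Lex.left _ _ h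
    · have he : r.2.1 = fuel := Nat.le_antisymm r.2.2 h
      rw [he]; exact Prod.Lex.right _ (by simp)
end

def using_DFS (n : Int) (graph : List (List Int)) : List (Int × Int) :=
  let adj := pvAdj n graph
  ((dfsA adj (n.toNat + 1) 1 (pvDis0 n) PySem.Set.empty).1.1).items

-- ===== PORT B =====
-- B's while loop over the frame stack; a frame is (node, children not yet consumed by its iterator)
def runM (adj : PySem.Dict Int (List Int)) (fuel : Nat) (stack : List (Int × List Int))
    (dis : PySem.Dict Int Int) (visit : PySem.Set Int) : PySem.Dict Int Int :=
  match stack with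
  | [] => dis
  | (node, chs) :: S =>
    match chs with
    | [] => runM adj fuel S dis visit                       -- iterator exhausted: pop
    | ch :: rest =>
      if PySem.Set.contains visit ch then
        runM adj fuel ((node, rest) :: S) dis visit         -- skip visited child
      else
        let dis' := dis.insert ch (1 + dis.getD node 0)
        match fuel with
        | 0 => runM adj 0 ((node, rest) :: S) dis' visit    -- fuel exhausted (never under Pre_)
        | f + 1 =>
          runM adj f ((ch, adj.getD ch []) :: (node, rest) :: S) dis'
            (PySem.Set.add visit ch)                        -- push ch's frame
termination_by (fuel, (stack.map (fun fr => fr.2.length + 1)).sum)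
decreasing_by
  · exact Prod.Lex.right _ (by simp)
  · exact Prod.Lex.right _ (by simp)
  · exact Prod.Lex.right _ (by simp)
  · exact Prod.Lex.left _ _ (by simp)

def using_DFS_alt (n : Int) (graph : List (List Int)) : List (Int × Int) :=
  let adj := pvAdj n graph
  (runM adj n.toNat [(1, adj.getD 1 [])] (pvDis0 n) (PySem.Set.ofList [1])).items

-- ===== PRECONDITION & SPEC =====
-- A raises KeyError/ValueError when n < 1 or an edge is not a pair of endpoints in 1..n
def Pre_using_DFS (n : Int) (graph : List (List Int)) : Prop :=
  1 ≤ n ∧ ∀ e ∈ graph, e.length = 2 ∧ ∀ x ∈ e, 1 ≤ x ∧ x ≤ n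
instance (n : Int) (graph : List (List Int)) : Decidable (Pre_using_DFS n graph) := by
  unfold Pre_using_DFS; infer_instance

def pvWitness_using_DFS : Int × List (List Int) := (3, [[1, 2], [2, 3]])

def Spec_using_DFS (n : Int) (graph : List (List Int)) (out : List (Int × Int)) : Prop := out = using_DFS_alt n graph
instance (n : Int) (graph : List (List Int)) (out : List (Int × Int)) : Decidable (Spec_using_DFS n graph out) := by unfold Spec_using_DFS; infer_instance

-- ===== CLAIM (what is proved, stated in full; the proofs are below) =====
def Claim_equal_using_DFS : Prop := ∀ (n : Int) (graph : List (List Int)), Dom_using_DFS n graph → Pre_using_DFS n graph → Spec_using_DFS n graph (using_DFS n graph)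

-- ===== LEMMAS AND PROOFS =====

-- bisimulation: running the machine on a top frame (node, chs) is A's child loop followed by
-- the machine on the rest of the stack, with the state and remaining fuel the loop returns
theorem runM_eq_dfsAC (adj : PySem.Dict Int (List Int)) (fuel : Nat) :
    ∀ (chs : List Int) (node : Int) (dis : PySem.Dict Int Int) (visit : PySem.Set Int)
      (S : List (Int × List Int)),
      runM adj fuel ((node, chs) :: S) dis visit =
        runM adj (dfsAC adj fuel node chs dis visit).2.1 S
          (dfsAC adj fuel node chs dis visit).1.1 (dfsAC adj fuel node chs dis visit).1.2 := by
  induction fuel using Nat.strong_induction_on with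
  | _ fuel IH =>
    intro chs
    induction chs with
    | nil =>
      intro node dis visit S
      rw [dfsAC, runM]
    | cons ch rest IHc =>
      intro node dis visit S
      by_cases h : PySem.Set.contains visit ch
      · rw [runM, dfsAC]
        simp only [h, if_true]
        exact IHc node dis visit S
      · cases fuel with
        | zero =>
          rw [runM, dfsAC]
          simp only [h, if_false, Bool.false_eq_true]
          rw [dfsA]
          exact IHc node _ visit S
        | succ f =>
          rw [runM, dfsAC]
          simp only [h, if_false, Bool.false_eq_true]
          rw [dfsA]
          rw [IH f (Nat.lt_succ_self f) (adj.getD ch []) ch _ _ _]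
          exact IH _ (Nat.lt_succ_of_le (dfsAC adj f ch (adj.getD ch [])
            (dis.insert ch (1 + dis.getD node 0)) (visit.add ch)).2.2) rest node _ _ S


-- ===== VERDICT (by name: the statement is the Claim_ definition above) =====
theorem using_DFS_spec : Claim_equal_using_DFS := by
  intro n graph _ _
  unfold Spec_using_DFS
  show (dfsA (pvAdj n graph) (n.toNat + 1) 1 (pvDis0 n) PySem.Set.empty).1.1.items =
    (runM (pvAdj n graph) n.toNat [(1, (pvAdj n graph).getD 1 [])] (pvDis0 n)
      (PySem.Set.ofList [1])).items
  have h : PySem.Set.ofList ([1] : List Int) = PySem.Set.add PySem.Set.empty 1 := rfl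
  rw [dfsA.eq_def, runM_eq_dfsAC, runM, h]
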